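-- pv_equiv track=rewrite | github.com/embassy-rs/stm32-data | parse.py | filter_interrupts
-- ===== SOURCE A (Python) =====
-- def filter_interrupts(peri_irqs, all_irqs):
--     filtered = {}
--
--     for signal, irqs in peri_irqs.items():
--         for irq in all_irqs:
--             if irq in irqs:
--                 filtered[signal] = irq
--                 break
--
--     return filtered
-- ===== SOURCE B (Python) =====
-- def filter_interrupts(peri_irqs, all_irqs):
--     # position index: first index at which each irq name occurs in all_irqs
--     pos = {}
--     for i, irq in enumerate(all_irqs):
--         if irq not in pos:
--             pos[irq] = i
--
--     filtered = {}
--     for sig, irqs in peri_irqs.items():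
--         hits = [irq for irq in irqs if irq in pos]
--         if hits:
--             filtered[sig] = min(hits, key=lambda irq: pos[irq])
--     return filtered
-- ===== Notes on version B (the rewrite author's own statement) =====
-- stated objective: faster
-- what changed: B builds a first-occurrence position index over all_irqs once and then, for each signal, picks the irq of its own list with the smallest position, instead of rescanning all_irqs with a list membership test for every signal.
import Mathlib
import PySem

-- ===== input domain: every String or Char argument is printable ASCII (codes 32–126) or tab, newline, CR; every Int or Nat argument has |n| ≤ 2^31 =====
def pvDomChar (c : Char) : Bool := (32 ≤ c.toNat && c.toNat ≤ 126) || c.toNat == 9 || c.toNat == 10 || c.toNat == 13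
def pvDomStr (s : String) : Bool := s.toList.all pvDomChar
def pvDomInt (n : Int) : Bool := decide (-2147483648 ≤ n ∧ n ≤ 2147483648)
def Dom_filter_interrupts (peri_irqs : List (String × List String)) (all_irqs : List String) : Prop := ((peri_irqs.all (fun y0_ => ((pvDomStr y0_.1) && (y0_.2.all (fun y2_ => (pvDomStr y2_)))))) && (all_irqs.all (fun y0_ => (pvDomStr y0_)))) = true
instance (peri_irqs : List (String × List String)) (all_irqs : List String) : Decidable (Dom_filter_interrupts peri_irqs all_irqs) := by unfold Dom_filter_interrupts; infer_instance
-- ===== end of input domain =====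

-- B replaces A's per-signal rescan of all_irqs by a first-occurrence position index built once,
-- picking per signal the irq with the smallest position (objective: alternative algorithm, same results).


-- ===== PORT A =====
-- A's inner loop: first irq of all_irqs contained in irqs (break on the first hit).
def pvFindIrq (all_irqs irqs : List String) : Option String :=
  match all_irqs with
  | [] => none
  | irq :: rest => if irqs.contains irq then some irq else pvFindIrq rest irqs

def filter_interrupts (peri_irqs : List (String × List String)) (all_irqs : List String) : List (String × String) :=
  (peri_irqs.foldl
    (fun (filtered : PySem.Dict String String) p =>
      match pvFindIrq all_irqs p.2 with
      | some irq => filtered.insert p.1 irq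
      | none => filtered)
    PySem.Dict.empty).items

-- ===== PORT B =====
-- B's first loop: pos[irq] = first index of irq in all_irqs.
def pvBuildPos (all_irqs : List String) : PySem.Dict String Int :=
  (PySem.List.enumerate all_irqs).foldl
    (fun pos p => if pos.contains p.2 then pos else pos.insert p.2 p.1)
    PySem.Dict.empty

def filter_interrupts_alt (peri_irqs : List (String × List String)) (all_irqs : List String) : List (String × String) :=
  let pos := pvBuildPos all_irqs
  (peri_irqs.foldl
    (fun (filtered : PySem.Dict String String) p =>
      let hits := p.2.filter (fun irq => pos.contains irq)
      match PySem.List.min? hits (fun irq => pos.getD irq 0) with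
      | some m => filtered.insert p.1 m
      | none => filtered)
    PySem.Dict.empty).items

-- ===== PRECONDITION & SPEC =====
def Spec_filter_interrupts (peri_irqs : List (String × List String)) (all_irqs : List String) (out : List (String × String)) : Prop := out = filter_interrupts_alt peri_irqs all_irqs
instance (peri_irqs : List (String × List String)) (all_irqs : List String) (out : List (String × String)) : Decidable (Spec_filter_interrupts peri_irqs all_irqs out) := by unfold Spec_filter_interrupts; infer_instance

-- ===== CLAIM (what is proved, stated in full; the proofs are below) =====
def Claim_equal_filter_interrupts : Prop := ∀ (peri_irqs : List (String × List String)) (all_irqs : List String), Dom_filter_interrupts peri_irqs all_irqs → Spec_filter_interrupts peri_irqs all_irqs (filter_interrupts peri_irqs all_irqs)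

-- ===== LEMMAS AND PROOFS =====

-- A's inner loop is List.find?.
theorem pvFindIrq_eq_find? (all_irqs irqs : List String) :
    pvFindIrq all_irqs irqs = all_irqs.find? (fun a => irqs.contains a) := by
  induction all_irqs with
  | nil => rfl
  | cons a rest ih =>
      simp only [pvFindIrq, List.find?]
      by_cases h : a ∈ irqs
      · simp [h]
      · simp [h, ih]

-- lookup in B's position index, generalized over the fold's start index and accumulator
theorem pvBuildPos_fold_get? (A : List String) (s : Int) (d : PySem.Dict String Int) (x : String) :
    ((PySem.List.enumerate A s).foldl
       (fun pos p => if pos.contains p.2 then pos else pos.insert p.2 p.1) d).get? x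
      = (d.get? x).or ((List.idxOf? x A).map (fun n : Nat => s + (n : Int))) := by
  induction A generalizing s d with
  | nil => simp [PySem.List.enumerate_nil]
  | cons a rest ih =>
      rw [PySem.List.enumerate_cons, List.foldl_cons, ih]
      by_cases hc : d.contains a = true
      · rw [if_pos hc]
        rw [PySem.Dict.contains_eq_isSome_get?] at hc
        by_cases hx : a = x
        · subst hx
          obtain ⟨v, hv⟩ := Option.isSome_iff_exists.mp hc
          simp [hv, List.idxOf?_cons]
        · have hne : (a == x) = false := by simp [hx]
          simp only [List.idxOf?_cons, hne, Bool.false_eq_true, if_false, Option.map_map]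
          congr 2
          funext n
          simp; ring
      · rw [if_neg hc]
        have hnone : d.get? a = none := by
          rw [PySem.Dict.contains_eq_isSome_get?] at hc
          simpa using hc
        by_cases hx : a = x
        · subst hx
          simp [PySem.Dict.get?_insert_self, hnone, List.idxOf?_cons]
        · rw [PySem.Dict.get?_insert, if_neg (fun h => hx h.symm)]
          have hne : (a == x) = false := by simp [hx]
          simp only [List.idxOf?_cons, hne, Bool.false_eq_true, if_false, Option.map_map]
          congr 2
          funext n
          simp; ring

theorem pvBuildPos_get? (A : List String) (x : String) :
    (pvBuildPos A).get? x = (List.idxOf? x A).map (fun n : Nat => (n : Int)) := by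
  rw [pvBuildPos, pvBuildPos_fold_get?]
  simp

theorem pvBuildPos_contains (A : List String) (x : String) :
    (pvBuildPos A).contains x = decide (x ∈ A) := by
  rw [PySem.Dict.contains_eq_isSome_get?, pvBuildPos_get?]
  by_cases h : x ∈ A
  · simp [h, Option.isSome_map, List.isSome_idxOf?.mpr h]
  · simp [h, List.idxOf?_eq_none_iff.mpr (by simpa using h)]

-- the heart of the equivalence: min-by-position over a signal's own irqs = first hit scanning all_irqs
theorem pv_key (A irqs : List String) :
    PySem.List.min? (irqs.filter (fun x => (pvBuildPos A).contains x))
        (fun x => (pvBuildPos A).getD x 0)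
      = A.find? (fun a => irqs.contains a) := by
  rcases hf : A.find? (fun a => irqs.contains a) with _ | a
  · -- nothing in all_irqs hits: hits is empty
    have hnone : ∀ x ∈ A, x ∉ irqs := by
      intro x hx
      have := List.find?_eq_none.mp hf x hx
      simpa using this
    have hfilter : irqs.filter (fun x => (pvBuildPos A).contains x) = [] := by
      apply List.filter_eq_nil_iff.mpr
      intro x hx
      rw [pvBuildPos_contains]
      simp only [decide_eq_true_eq]
      exact fun hxa => hnone x hxa hx
    rw [hfilter]
    exact (PySem.List.min?_eq_none_iff _ _).mpr rfl
  · -- a is the first element of A contained in irqs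
    obtain ⟨hpa, as, bs, hA, hmiss⟩ := List.find?_eq_some_iff_append.mp hf
    subst hA
    have hairqs : a ∈ irqs := by simpa using hpa
    have haA : a ∈ as ++ a :: bs := by simp
    have hahit : a ∈ irqs.filter (fun x => (pvBuildPos (as ++ a :: bs)).contains x) := by
      rw [List.mem_filter, pvBuildPos_contains]
      exact ⟨hairqs, by simp⟩
    rcases hm : PySem.List.min? (irqs.filter (fun x => (pvBuildPos (as ++ a :: bs)).contains x))
        (fun x => (pvBuildPos (as ++ a :: bs)).getD x 0) with _ | m
    · have := (PySem.List.min?_eq_none_iff _ _).mp hm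
      rw [this] at hahit
      simp at hahit
    · have hmhit := PySem.List.min?_mem hm
      have hmirqs : m ∈ irqs := (List.mem_filter.mp hmhit).1
      have hmA : m ∈ as ++ a :: bs := by
        have := (List.mem_filter.mp hmhit).2
        rwa [pvBuildPos_contains, decide_eq_true_eq] at this
      -- first-occurrence indices of m and a
      obtain ⟨im, him⟩ := Option.isSome_iff_exists.mp (List.isSome_idxOf?.mpr hmA)
      obtain ⟨ia, hia⟩ := Option.isSome_iff_exists.mp (List.isSome_idxOf?.mpr haA)
      have hkey := PySem.List.min?_isMin hm a hahit
      have hgm : (pvBuildPos (as ++ a :: bs)).getD m 0 = (im : Int) := by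
        rw [PySem.Dict.getD_eq_get?_getD, pvBuildPos_get?, him]; rfl
      have hga : (pvBuildPos (as ++ a :: bs)).getD a 0 = (ia : Int) := by
        rw [PySem.Dict.getD_eq_get?_getD, pvBuildPos_get?, hia]; rfl
      rw [hgm, hga] at hkey
      have hle : im ≤ ia := by exact_mod_cast hkey
      obtain ⟨hmlt, hAm, hmfirst⟩ := List.idxOf?_eq_some_iff.mp him
      obtain ⟨halt, hAa, hafirst⟩ := List.idxOf?_eq_some_iff.mp hia
      -- the first occurrence of a is at index as.length: a is at as.length, and no earlier
      -- index can hold a since a ∈ irqs while everything in as misses irqs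
      have hAat : (as ++ a :: bs)[as.length]'(by simp) = a := by
        rw [List.getElem_append_right (Nat.le_refl as.length)]
        simp
      have hia_le : ia ≤ as.length := by
        by_contra h
        exact hafirst as.length (by omega) hAat
      have him_ge : as.length ≤ im := by
        by_contra h
        have hlt : im < as.length := by omega
        have hmem : (as ++ a :: bs)[im]'hmlt ∈ as := by
          rw [List.getElem_append_left hlt]
          exact List.getElem_mem _
        have hmiss' := hmiss _ hmem
        rw [hAm] at hmiss'
        simp [hmirqs] at hmiss'
      have heq : im = ia := by omega
      subst heq
      rw [hAm] at hAa
      rw [hAa]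

-- ===== VERDICT (by name: the statement is the Claim_ definition above) =====
theorem filter_interrupts_spec : Claim_equal_filter_interrupts := by
  intro peri_irqs all_irqs _
  unfold Spec_filter_interrupts filter_interrupts filter_interrupts_alt
  have hstep :
      (fun (filtered : PySem.Dict String String) (p : String × List String) =>
        match pvFindIrq all_irqs p.2 with
        | some irq => filtered.insert p.1 irq
        | none => filtered)
      = (fun (filtered : PySem.Dict String String) (p : String × List String) =>
        match PySem.List.min? (p.2.filter (fun irq => (pvBuildPos all_irqs).contains irq))
            (fun irq => (pvBuildPos all_irqs).getD irq 0) with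
        | some m => filtered.insert p.1 m
        | none => filtered) := by
    funext filtered p
    rw [pvFindIrq_eq_find?, ← pv_key]
  rw [hstep]
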